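-- pv_equiv track=rewrite | github.com/nataliakoliou/ML-Ciphertext-Decryption | ciphertext-decryption.py | update_y
-- ===== SOURCE A (Python) =====
-- def update_y(fy, y):
--     count = 0
--     for i in range(len(fy)):
--         if fy[i] == "NN":
--             if y[count] not in fy:
--                 fy[i] = y[count]
--             count += 1
--     return fy
-- ===== SOURCE B (Python) =====
-- def update_y(fy, y):
--     # Staged alternative with an incrementally-maintained hash set:
--     # decide which of the first m = #placeholders values of y get placed
--     # (against set(fy) grown with each placed value), then fill the
--     # placeholders in one pass.  Mutates fy in place like A.
--     m = fy.count("NN")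
--     present = set(fy)
--     chosen = []
--     for w in y[:m]:
--         if w in present:
--             chosen.append("NN")
--         else:
--             chosen.append(w)
--             present.add(w)
--     it = iter(chosen)
--     fy[:] = [next(it) if v == "NN" else v for v in fy]
--     return fy
-- ===== Notes on version B (the rewrite author's own statement) =====
-- stated objective: alternative
-- what changed: Replaces A's per-placeholder membership scan of the live mutating list by a staged algorithm: count placeholders, build a hash set of present values once, decide in one pass over y[:m] which values get placed (growing the set with each placed value), then fill the placeholders in a single fill pass; correct because at each of A's tests the live list's value set equals set(original fy) plus the values placed so far.
import Mathlib
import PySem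

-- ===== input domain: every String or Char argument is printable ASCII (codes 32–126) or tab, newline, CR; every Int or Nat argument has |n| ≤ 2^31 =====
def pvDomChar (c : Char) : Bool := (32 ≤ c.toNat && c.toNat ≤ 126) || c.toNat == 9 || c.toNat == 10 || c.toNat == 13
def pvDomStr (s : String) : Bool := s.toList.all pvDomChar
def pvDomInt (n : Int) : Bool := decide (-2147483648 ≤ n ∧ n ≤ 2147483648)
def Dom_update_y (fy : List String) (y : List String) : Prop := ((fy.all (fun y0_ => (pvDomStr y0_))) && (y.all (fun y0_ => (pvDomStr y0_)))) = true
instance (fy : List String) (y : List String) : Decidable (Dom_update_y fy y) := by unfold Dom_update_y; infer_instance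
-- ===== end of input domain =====

-- B replaces A's per-placeholder scan of the live list by a staged algorithm (count placeholders,
-- one hash set built once and grown with placed values, a choose pass over y[:m], a fill pass);
-- objective: alternative. Both Pythons mutate fy in place identically; the equivalence proved
-- here is about the return value.

-- ===== PORT A =====
def update_y (fy : List String) (y : List String) : List String :=
  ((PySem.List.pyRange 0 fy.length 1).foldl
    (fun (st : List String × Int) i =>
      if PySem.List.pyGetD st.1 i "" == "NN" then
        if ¬ (PySem.List.pyGetD y st.2 "" ∈ st.1) then
          (PySem.List.pySetD st.1 i (PySem.List.pyGetD y st.2 ""), st.2 + 1)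
        else (st.1, st.2 + 1)
      else st)
    (fy, 0)).1

-- ===== PORT B =====
-- the choose loop: for w in y[:m]: append w or "NN" to chosen, growing the set
def pvChoose (ws : List String) (pres : PySem.Set String) : List String :=
  match ws with
  | [] => []
  | w :: ws' =>
    if PySem.Set.contains pres w then "NN" :: pvChoose ws' pres
    else w :: pvChoose ws' (PySem.Set.add pres w)

-- the fill pass: [next(it) if v == "NN" else v for v in fy] (headD "": iterator never
-- exhausted under Pre_, where chosen has exactly one entry per placeholder)
def pvFill (vs : List String) (ch : List String) : List String :=
  match vs with
  | [] => []
  | v :: vs' =>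
    if v == "NN" then ch.headD "" :: pvFill vs' ch.tail
    else v :: pvFill vs' ch

def update_y_alt (fy : List String) (y : List String) : List String :=
  let m := PySem.List.count fy "NN"
  let present := PySem.Set.ofList fy
  let chosen := pvChoose (PySem.List.slice y (some 0) (some (m : Int))) present
  pvFill fy chosen

-- ===== PRECONDITION & SPEC =====
-- A raises IndexError at y[count] exactly when fy has more "NN" placeholders than y has entries.
def Pre_update_y (fy : List String) (y : List String) : Prop := fy.count "NN" ≤ y.length
instance (fy : List String) (y : List String) : Decidable (Pre_update_y fy y) := by unfold Pre_update_y; infer_instance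
def pvWitness_update_y : List String × List String := (["NN", "a"], ["b"])

def Spec_update_y (fy : List String) (y : List String) (out : List String) : Prop := out = update_y_alt fy y
instance (fy : List String) (y : List String) (out : List String) : Decidable (Spec_update_y fy y out) := by unfold Spec_update_y; infer_instance

-- ===== CLAIM (what is proved, stated in full; the proofs are below) =====
def Claim_equal_update_y : Prop := ∀ (fy : List String) (y : List String), Dom_update_y fy y → Pre_update_y fy y → Spec_update_y fy y (update_y fy y)

-- ===== LEMMAS AND PROOFS =====

-- A's loop step, abstracted.
def pvStepA (y : List String) (st : List String × Int) (i : Int) : List String × Int :=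
  if PySem.List.pyGetD st.1 i "" == "NN" then
    if ¬ (PySem.List.pyGetD y st.2 "" ∈ st.1) then
      (PySem.List.pySetD st.1 i (PySem.List.pyGetD y st.2 ""), st.2 + 1)
    else (st.1, st.2 + 1)
  else st

-- A's index fold as a structural recursion: done = already-scanned prefix (possibly updated),
-- rest = untouched original suffix, c = A's counter.
def pvGoA (y : List String) : List String → List String → Int → List String
  | done, [], _ => done
  | done, v :: rest, c =>
    if v == "NN" then
      if ¬ (PySem.List.pyGetD y c "" ∈ (done ++ v :: rest)) then
        pvGoA y (done ++ [PySem.List.pyGetD y c ""]) rest (c + 1)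
      else pvGoA y (done ++ [v]) rest (c + 1)
    else pvGoA y (done ++ [v]) rest c

theorem pvGetD_append_length (pre ys : List String) (v d : String) :
    PySem.List.pyGetD (pre ++ v :: ys) (pre.length : Int) d = v := by
  simp [PySem.List.pyGetD_natCast, List.getD_eq_getElem?_getD,
    List.getElem?_append_right (le_refl pre.length)]

theorem pvSetD_append_length (pre ys : List String) (v w : String) :
    PySem.List.pySetD (pre ++ v :: ys) (pre.length : Int) w = pre ++ w :: ys := by
  rw [PySem.List.pySetD_natCast]
  induction pre with
  | nil => simp
  | cons a pre ih => simp [List.set, ih]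

-- A's fold over range(p, p + |rest|) equals pvGoA, for p = |done|.
theorem pvA_struct (y : List String) :
    ∀ (rest done : List String) (c : Int),
      ((PySem.List.pyRange done.length (done.length + rest.length) 1).foldl
        (pvStepA y) (done ++ rest, c)).1 = pvGoA y done rest c := by
  intro rest
  induction rest with
  | nil => intro done c; simp [pvGoA]
  | cons v rest ih =>
    intro done c
    have hcons : PySem.List.pyRange (done.length : Int)
        ((done.length : Int) + ((v :: rest).length : Int)) 1 =
        (done.length : Int) ::
          PySem.List.pyRange ((done.length : Int) + 1)
            ((done.length : Int) + ((v :: rest).length : Int)) 1 := by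
      apply PySem.List.pyRange_one_cons
      simp only [List.length_cons]; push_cast; omega
    rw [hcons, List.foldl_cons]
    have hstep : pvStepA y (done ++ v :: rest, c) (done.length : Int) =
        (if v == "NN" then
          (if ¬ (PySem.List.pyGetD y c "" ∈ (done ++ v :: rest)) then
            (done ++ PySem.List.pyGetD y c "" :: rest, c + 1)
          else (done ++ v :: rest, c + 1))
        else (done ++ v :: rest, c)) := by
      simp only [pvStepA, pvGetD_append_length, pvSetD_append_length]
    rw [hstep]
    have harith : ((done.length : Int) + 1) + ((rest.length : Nat) : Int) =
        (done.length : Int) + (((v :: rest).length : Nat) : Int) := by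
      simp only [List.length_cons]; push_cast; ring
    by_cases hv : v == "NN"
    · by_cases hmem : PySem.List.pyGetD y c "" ∈ (done ++ v :: rest)
      · simp only [hv, hmem, not_true, if_true, if_false]
        have key := ih (done ++ [v]) (c + 1)
        rw [show (((done ++ [v]).length : Nat) : Int) = (done.length : Int) + 1 from by
              push_cast [List.length_append, List.length_cons, List.length_nil]; ring,
            harith, show done ++ [v] ++ rest = done ++ v :: rest from by simp] at key
        rw [key]
        simp [pvGoA, hv, hmem]
      · simp only [hv, hmem, not_false_iff, if_true]
        have key := ih (done ++ [PySem.List.pyGetD y c ""]) (c + 1)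
        rw [show (((done ++ [PySem.List.pyGetD y c ""]).length : Nat) : Int) =
              (done.length : Int) + 1 from by
              push_cast [List.length_append, List.length_cons, List.length_nil]; ring,
            harith, show done ++ [PySem.List.pyGetD y c ""] ++ rest =
              done ++ PySem.List.pyGetD y c "" :: rest from by simp] at key
        rw [key]
        simp [pvGoA, hv, hmem]
    · simp only [hv, if_false, Bool.false_eq_true]
      have key := ih (done ++ [v]) c
      rw [show (((done ++ [v]).length : Nat) : Int) = (done.length : Int) + 1 from by
            push_cast [List.length_append, List.length_cons, List.length_nil]; ring,
          harith, show done ++ [v] ++ rest = done ++ v :: rest from by simp] at key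
      rw [key]
      simp [pvGoA, hv]
  termination_by rest => rest.length

-- Main invariant: pvGoA equals done ++ fill, where the choose pass runs on the remaining
-- slice of y against a set pres whose members are exactly the values currently in the
-- list, up to "NN" (which is always in the live list at a test, since the tested
-- position itself holds "NN").
theorem pv_main (y : List String) (m : Nat) (hm : m ≤ y.length) :
    ∀ (rest done : List String) (k : Nat) (pres : PySem.Set String),
      (∀ w, w ∈ done ++ rest → w ∈ pres) →
      (∀ w, w ∈ pres → w ∈ done ++ rest ∨ w = "NN") →
      k + rest.count "NN" = m →
      pvGoA y done rest (k : Int) =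
        done ++ pvFill rest (pvChoose ((y.take m).drop k) pres) := by
  intro rest
  induction rest with
  | nil => intro done k pres _ _ _; simp [pvGoA, pvFill]
  | cons v rest ih =>
    intro done k pres ha hb hcount
    by_cases hv : v = "NN"
    · subst hv
      have hk : k < m := by
        have : ("NN" :: rest).count "NN" = rest.count "NN" + 1 := by
          simp [List.count_cons]
        omega
      have hky : k < y.length := lt_of_lt_of_le hk hm
      have htlen : (y.take m).length = m := by simp [List.length_take]; omega
      have hdrop : (y.take m).drop k = y[k] :: (y.take m).drop (k + 1) := by
        rw [List.drop_eq_getElem_cons (by omega)]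
        congr 1
        exact List.getElem_take
      have hw : PySem.List.pyGetD y (k : Int) "" = y[k] := by
        simp [PySem.List.pyGetD_natCast, List.getD_eq_getElem?_getD,
          List.getElem?_eq_getElem hky]
      by_cases hmem : y[k] ∈ (done ++ "NN" :: rest)
      · -- skip: value already present in the live list, hence in pres
        have hpres : y[k] ∈ pres := ha _ hmem
        have hcont : PySem.Set.contains pres y[k] = true :=
          (PySem.Set.contains_iff pres y[k]).mpr hpres
        have hstep : pvGoA y done ("NN" :: rest) (k : Int) =
            pvGoA y (done ++ ["NN"]) rest ((k : Int) + 1) := by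
          simp [pvGoA, hw, hmem]
        rw [hstep, hdrop]
        have hchoose : pvChoose (y[k] :: (y.take m).drop (k + 1)) pres =
            "NN" :: pvChoose ((y.take m).drop (k + 1)) pres := by
          simp only [pvChoose]; rw [hcont]; simp
        rw [hchoose]
        have hfill : pvFill ("NN" :: rest)
            ("NN" :: pvChoose ((y.take m).drop (k + 1)) pres) =
            "NN" :: pvFill rest (pvChoose ((y.take m).drop (k + 1)) pres) := by
          simp [pvFill]
        rw [hfill]
        have := ih (done ++ ["NN"]) (k + 1) pres
          (by intro w hwmem; apply ha; simpa [List.append_assoc] using hwmem)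
          (by intro w hwp; rcases hb w hwp with h | h
              · left; simpa [List.append_assoc] using h
              · right; exact h)
          (by have : ("NN" :: rest).count "NN" = rest.count "NN" + 1 := by
                simp [List.count_cons]
              omega)
        rw [show ((k : Int) + 1) = (((k + 1 : Nat)) : Int) by push_cast; ring, this]
        simp
      · -- place: value absent from the live list, hence absent from pres
        have hpres : y[k] ∉ pres := by
          intro hwp
          rcases hb _ hwp with h | h
          · exact hmem h
          · exact hmem (by rw [h]; exact List.mem_append_right _ (List.mem_cons_self ..))
        have hcont : PySem.Set.contains pres y[k] = false := by
          by_contra h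
          exact hpres ((PySem.Set.contains_iff pres y[k]).mp (by
            cases hc : PySem.Set.contains pres y[k] with
            | false => exact absurd hc h
            | true => rfl))
        have hstep : pvGoA y done ("NN" :: rest) (k : Int) =
            pvGoA y (done ++ [y[k]]) rest ((k : Int) + 1) := by
          simp [pvGoA, hw, hmem]
        rw [hstep, hdrop]
        have hchoose : pvChoose (y[k] :: (y.take m).drop (k + 1)) pres =
            y[k] :: pvChoose ((y.take m).drop (k + 1)) (PySem.Set.add pres y[k]) := by
          simp only [pvChoose]; rw [hcont]; simp
        rw [hchoose]
        have hfill : pvFill ("NN" :: rest)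
            (y[k] :: pvChoose ((y.take m).drop (k + 1)) (PySem.Set.add pres y[k])) =
            y[k] :: pvFill rest
              (pvChoose ((y.take m).drop (k + 1)) (PySem.Set.add pres y[k])) := by
          simp [pvFill]
        rw [hfill]
        have := ih (done ++ [y[k]]) (k + 1) (PySem.Set.add pres y[k])
          (by intro w hwmem
              rw [PySem.Set.mem_add]
              simp only [List.append_assoc, List.singleton_append, List.mem_append,
                List.mem_cons] at hwmem
              rcases hwmem with h | h | h
              · exact Or.inl (ha w (List.mem_append_left _ h))
              · exact Or.inr h
              · exact Or.inl (ha w (List.mem_append_right _ (List.mem_cons_of_mem _ h))))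
          (by intro w hwp
              rw [PySem.Set.mem_add] at hwp
              rcases hwp with h | h
              · rcases hb w h with h2 | h2
                · simp only [List.append_assoc, List.singleton_append, List.mem_append,
                    List.mem_cons] at h2 ⊢
                  rcases h2 with h3 | h3 | h3
                  · exact Or.inl (Or.inl h3)
                  · exact Or.inr h3
                  · exact Or.inl (Or.inr (Or.inr h3))
                · exact Or.inr h2
              · subst h
                exact Or.inl (by simp))
          (by have : ("NN" :: rest).count "NN" = rest.count "NN" + 1 := by
                simp [List.count_cons]
              omega)
        rw [show ((k : Int) + 1) = (((k + 1 : Nat)) : Int) by push_cast; ring, this]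
        simp
    · -- not a placeholder: both sides copy v through
      have hvb : (v == "NN") = false := by simp [hv]
      have hstep : pvGoA y done (v :: rest) (k : Int) =
          pvGoA y (done ++ [v]) rest (k : Int) := by
        simp [pvGoA, hvb]
      have hfill : pvFill (v :: rest) (pvChoose ((y.take m).drop k) pres) =
          v :: pvFill rest (pvChoose ((y.take m).drop k) pres) := by
        simp [pvFill, hvb]
      rw [hstep, hfill]
      have := ih (done ++ [v]) k pres
        (by intro w hwmem; apply ha; simpa [List.append_assoc] using hwmem)
        (by intro w hwp; rcases hb w hwp with h | h
            · left; simpa [List.append_assoc] using h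
            · right; exact h)
        (by have : (v :: rest).count "NN" = rest.count "NN" := by
              simp [List.count_cons, hv]
            omega)
      rw [this]
      simp

-- ===== VERDICT (by name: the statement is the Claim_ definition above) =====
theorem update_y_spec : Claim_equal_update_y := by
  intro fy y _ hpre
  show update_y fy y = update_y_alt fy y
  have ha : update_y fy y = pvGoA y [] fy 0 := by
    show ((PySem.List.pyRange 0 fy.length 1).foldl (pvStepA y) (fy, 0)).1 = pvGoA y [] fy 0
    have := pvA_struct y fy [] 0
    simpa only [List.length_nil, Nat.cast_zero, zero_add, List.nil_append] using this
  have hb : update_y_alt fy y =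
      pvFill fy (pvChoose ((y.take (fy.count "NN")).drop 0) (PySem.Set.ofList fy)) := by
    simp [update_y_alt, PySem.List.count_eq, PySem.List.slice_to y (Int.natCast_nonneg _)]
  rw [ha, hb]
  have := pv_main y (fy.count "NN") hpre fy [] 0 (PySem.Set.ofList fy)
    (by intro w hwmem; rw [PySem.Set.mem_ofList]; simpa using hwmem)
    (by intro w hwp; left; simpa using (PySem.Set.mem_ofList _ _).mp hwp)
    (by simp)
  simpa using this
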